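-- pv_equiv track=rewrite | github.com/An-ling-TS/niuke | WY22.Fibonacci数列.py | solution
-- ===== SOURCE A (Python) =====
-- def solution(n):
--     rs=0
--     f0=0
--     f1=1
--     while f0<n and f1<n:
--         f0=f0+f1
--         if f0>=n:
--             return min(n-f1,f0-n)
--         f1=f0+f1
--         if f1>=n:
--             return min(n-f0,f1-n)
--     return 0
-- ===== SOURCE B (Python) =====
-- def _fib_pair(k):
--     # fast doubling: returns (F(k), F(k+1))
--     if k == 0:
--         return (0, 1)
--     a, b = _fib_pair(k // 2)
--     c = a * (2 * b - a)
--     d = a * a + b * b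
--     if k % 2:
--         return (d, c + d)
--     return (c, d)
--
-- def solution(n):
--     if n <= 1:
--         return 0
--     # exponential search for an index hi with F(hi) >= n, then binary search
--     # for the bracket F(lo) < n <= F(lo+1); answer is the nearer endpoint.
--     hi = 2
--     while _fib_pair(hi)[0] < n:
--         hi *= 2
--     lo = hi // 2
--     while lo + 1 < hi:
--         mid = (lo + hi) // 2
--         if _fib_pair(mid)[0] < n:
--             lo = mid
--         else:
--             hi = mid
--     return min(n - _fib_pair(lo)[0], _fib_pair(hi)[0] - n)
-- ===== Notes on version B (the rewrite author's own statement) =====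
-- stated objective: alternative
-- what changed: B replaces A's linear Fibonacci iteration with mid-loop early returns by fast-doubling computation of F(k) plus an exponential-then-binary search for the bracketing index, reading the answer once from the bracket F(lo) < n <= F(lo+1).
import Mathlib
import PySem

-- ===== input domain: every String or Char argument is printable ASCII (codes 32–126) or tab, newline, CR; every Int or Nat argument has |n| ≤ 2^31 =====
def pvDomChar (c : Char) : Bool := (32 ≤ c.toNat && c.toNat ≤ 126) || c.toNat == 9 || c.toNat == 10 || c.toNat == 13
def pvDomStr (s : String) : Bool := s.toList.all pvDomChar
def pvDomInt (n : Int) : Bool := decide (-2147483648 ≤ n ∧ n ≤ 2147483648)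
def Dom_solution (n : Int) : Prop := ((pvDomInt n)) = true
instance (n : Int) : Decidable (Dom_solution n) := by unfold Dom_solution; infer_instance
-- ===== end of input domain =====

-- B replaces A's linear Fibonacci iteration by fast-doubling computation of F(k)
-- plus an exponential-then-binary search for the bracketing pair (objective: alternative).

-- ===== PORT A =====
-- A's while loop: two Fibonacci steps per iteration, each followed by an early-return test.
-- The proof arguments only serve termination.
def solutionLoopA (n f0 f1 : Int) (h0 : 0 ≤ f0) (h1 : f0 < f1) : Int :=
  if hg : f0 < n ∧ f1 < n then
    if h2 : f0 + f1 ≥ n then min (n - f1) (f0 + f1 - n)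
    else
      if h3 : (f0 + f1) + f1 ≥ n then min (n - (f0 + f1)) ((f0 + f1) + f1 - n)
      else solutionLoopA n (f0 + f1) ((f0 + f1) + f1) (by omega) (by omega)
  else 0
termination_by (2 * n - f0 - f1).toNat
decreasing_by omega

def solution (n : Int) : Int :=
  -- rs = 0 in the Python is written to once and never read
  solutionLoopA n 0 1 (by norm_num) (by norm_num)

-- ===== PORT B =====
-- Source B's _fib_pair: fast doubling, returns (F(k), F(k+1)).  The index k is a
-- nonnegative Python int throughout; it is ported as Nat (k // 2, k % 2 agree there).
def fibPair (k : Nat) : Int × Int :=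
  if k = 0 then (0, 1)
  else
    let p := fibPair (k / 2)
    let c := p.1 * (2 * p.2 - p.1)
    let d := p.1 * p.1 + p.2 * p.2
    if k % 2 = 1 then (d, c + d) else (c, d)
termination_by k
decreasing_by exact Nat.div_lt_self (Nat.pos_of_ne_zero (by assumption)) (by norm_num)

-- cited by expLoop's termination proof: fibPair computes Fibonacci numbers
theorem fibPair_eq (k : Nat) : fibPair k = ((Nat.fib k : Int), (Nat.fib (k + 1) : Int)) := by
  induction k using Nat.strong_induction_on with
  | _ k ih =>
    rw [fibPair]
    by_cases hk : k = 0
    · subst hk; simp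
    · have hrec := ih (k / 2) (Nat.div_lt_self (Nat.pos_of_ne_zero hk) one_lt_two)
      simp only [if_neg hk, hrec]
      have hle : Nat.fib (k / 2) ≤ 2 * Nat.fib (k / 2 + 1) := by
        have h : Nat.fib (k / 2) ≤ Nat.fib (k / 2 + 1) := Nat.fib_mono (Nat.le_succ _)
        omega
      have hc : ((Nat.fib (k / 2) : Int)) * (2 * (Nat.fib (k / 2 + 1) : Int) - (Nat.fib (k / 2) : Int))
          = (Nat.fib (2 * (k / 2)) : Int) := by
        rw [Nat.fib_two_mul, Nat.cast_mul, Nat.cast_sub hle]; push_cast; ring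
      have hd : ((Nat.fib (k / 2) : Int)) * (Nat.fib (k / 2) : Int)
          + (Nat.fib (k / 2 + 1) : Int) * (Nat.fib (k / 2 + 1) : Int)
          = (Nat.fib (2 * (k / 2) + 1) : Int) := by
        rw [Nat.fib_two_mul_add_one]; push_cast; ring
      by_cases hodd : k % 2 = 1
      · have hk2 : 2 * (k / 2) + 1 = k := by omega
        have hk3 : 2 * (k / 2) + 2 = k + 1 := by omega
        simp only [if_pos hodd, Prod.mk.injEq]
        constructor
        · rw [hd, hk2]
        · rw [hc, hd, ← hk3, Nat.fib_add_two]; push_cast; ring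
      · have hk2 : 2 * (k / 2) = k := by omega
        have hk3 : 2 * (k / 2) + 1 = k + 1 := by omega
        simp only [if_neg hodd, Prod.mk.injEq]
        exact ⟨by rw [hc, hk2], by rw [hd, hk3]⟩

-- Source B's exponential-search loop: double hi until F(hi) >= n
def expLoop (n : Int) (hi : Nat) (h2 : 2 ≤ hi) : Nat :=
  if (fibPair hi).1 < n then expLoop n (hi * 2) (by omega) else hi
termination_by (n - (fibPair hi).1).toNat
decreasing_by
  have h1 : (fibPair hi).1 = (Nat.fib hi : Int) := by rw [fibPair_eq]
  have h2' : (fibPair (hi * 2)).1 = (Nat.fib (hi * 2) : Int) := by rw [fibPair_eq]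
  have hstep : Nat.fib hi < Nat.fib (hi * 2) :=
    lt_of_lt_of_le (Nat.fib_lt_fib_succ (by omega)) (Nat.fib_mono (by omega))
  rename_i hguard
  rw [h1] at hguard ⊢; rw [h2']
  omega

-- Source B's binary-search loop: narrow (lo, hi) to the bracket with hi = lo + 1
def binLoop (n : Int) (lo hi : Nat) : Nat × Nat :=
  if h : lo + 1 < hi then
    let mid := (lo + hi) / 2
    if (fibPair mid).1 < n then binLoop n mid hi else binLoop n lo mid
  else (lo, hi)
termination_by hi - lo
decreasing_by all_goals omega

def solution_alt (n : Int) : Int :=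
  if n ≤ 1 then 0
  else
    let hi := expLoop n 2 (le_refl 2)
    let p := binLoop n (hi / 2) hi
    min (n - (fibPair p.1).1) ((fibPair p.2).1 - n)

-- ===== PRECONDITION & SPEC =====
def Spec_solution (n : Int) (out : Int) : Prop := out = solution_alt n
instance (n : Int) (out : Int) : Decidable (Spec_solution n out) := by unfold Spec_solution; infer_instance

-- ===== CLAIM (what is proved, stated in full; the proofs are below) =====
def Claim_equal_solution : Prop := ∀ (n : Int), Dom_solution n → Spec_solution n (solution n)

-- ===== LEMMAS AND PROOFS =====

-- proof-only reference loop: one Fibonacci step per iteration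
def refLoop (n a b : Int) (h0 : 0 ≤ a) (h1 : a ≤ b) (h2 : 0 < b) : Int :=
  if hlt : b < n then refLoop n b (a + b) (by omega) (by omega) (by omega)
  else max 0 (min (n - a) (b - n))
termination_by (2 * n - a - b).toNat
decreasing_by omega

-- A's loop equals the reference loop
lemma loopA_eq_ref (n f0 f1 : Int) (h0 : 0 ≤ f0) (h1 : f0 < f1) (hlt : f1 < n) :
    solutionLoopA n f0 f1 h0 h1
      = refLoop n f0 f1 h0 (le_of_lt h1) (lt_of_le_of_lt h0 h1) := by
  fun_induction solutionLoopA with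
  | case1 f0 f1 h0 h1 hg h2 =>
      rw [refLoop]; rw [dif_pos hlt]
      rw [refLoop]; rw [dif_neg (by omega)]
      omega
  | case2 f0 f1 h0 h1 hg h2 h3 =>
      rw [refLoop]; rw [dif_pos hlt]
      rw [refLoop]; rw [dif_pos (by omega)]
      rw [refLoop]; rw [dif_neg (by omega)]
      omega
  | case3 f0 f1 h0 h1 hg h2 h3 ih =>
      rw [refLoop]; rw [dif_pos hlt]
      rw [refLoop]; rw [dif_pos (by omega)]
      simp only [show f1 + (f0 + f1) = (f0 + f1) + f1 from by ring]
      exact ih (by omega)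
  | case4 f0 f1 h0 h1 hg =>
      exact absurd (⟨by omega, hlt⟩ : f0 < n ∧ f1 < n) hg

lemma fib_nonneg (k : Nat) : (0 : Int) ≤ (Nat.fib k : Int) := Int.natCast_nonneg _

-- the reference loop started inside the Fibonacci chain stops at the bracket
lemma refLoop_bracket (n : Int) (j : Nat) (hl : (Nat.fib j : Int) < n)
    (hh : n ≤ (Nat.fib (j + 1) : Int)) :
    ∀ d i, i + d = j → ∀ (h0 : 0 ≤ (Nat.fib i : Int)) (h1 : (Nat.fib i : Int) ≤ (Nat.fib (i + 1) : Int)) (h2 : (0 : Int) < (Nat.fib (i + 1) : Int)),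
      refLoop n (Nat.fib i : Int) (Nat.fib (i + 1) : Int) h0 h1 h2
        = max 0 (min (n - (Nat.fib j : Int)) ((Nat.fib (j + 1) : Int) - n)) := by
  intro d
  induction d with
  | zero =>
      intro i hi h0 h1 h2
      have : i = j := by omega
      subst this
      rw [refLoop, dif_neg (by omega)]
  | succ d ih =>
      intro i hi h0 h1 h2
      have hlt : (Nat.fib (i + 1) : Int) < n := by
        have hm : Nat.fib (i + 1) ≤ Nat.fib j := Nat.fib_mono (by omega)
        have := hl; push_cast at *; omega
      rw [refLoop, dif_pos hlt]
      have hsum : (Nat.fib i : Int) + (Nat.fib (i + 1) : Int) = (Nat.fib (i + 2) : Int) := by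
        push_cast [Nat.fib_add_two]; ring
      simp only [hsum]
      exact ih (i + 1) (by omega) _ _ _

-- the exponential search returns 2*j with F(j) < n <= F(2*j)
lemma expLoop_spec (n : Int) : ∀ (hi : Nat) (h2 : 2 ≤ hi), (Nat.fib hi : Int) < n →
    ∃ j, 2 ≤ j ∧ (Nat.fib j : Int) < n ∧ expLoop n hi h2 = 2 * j ∧ n ≤ (Nat.fib (2 * j) : Int) := by
  intro hi h2
  fun_induction expLoop n hi h2 with
  | case1 hi h2 hguard ih =>
      intro hfib
      by_cases hnext : (Nat.fib (hi * 2) : Int) < n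
      · obtain ⟨j, hj⟩ := ih hnext
        exact ⟨j, hj⟩
      · refine ⟨hi, h2, hfib, ?_, ?_⟩
        · rw [expLoop, if_neg (by simpa [fibPair_eq] using hnext)]
          omega
        · rw [show 2 * hi = hi * 2 from Nat.mul_comm 2 hi]; omega
  | case2 hi h2 hguard =>
      intro hfib
      rw [fibPair_eq] at hguard
      exact absurd hfib (by simpa using hguard)

-- the binary search maintains the bracket and stops at width one
lemma binLoop_spec (n : Int) : ∀ (lo hi : Nat), 2 ≤ lo → lo < hi →
    (Nat.fib lo : Int) < n → n ≤ (Nat.fib hi : Int) →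
    ∃ j, 2 ≤ j ∧ (Nat.fib j : Int) < n ∧ n ≤ (Nat.fib (j + 1) : Int) ∧
      binLoop n lo hi = (j, j + 1) := by
  intro lo hi
  fun_induction binLoop n lo hi with
  | case1 lo hi h mid hmid ih =>
      intro h2 hlt hl hh
      have hmid' : (Nat.fib mid : Int) < n := by rwa [fibPair_eq] at hmid
      exact ih (by omega) (by omega) hmid' hh
  | case2 lo hi h mid hmid ih =>
      intro h2 hlt hl hh
      have hmid' : n ≤ (Nat.fib mid : Int) := by rw [fibPair_eq] at hmid; simp at hmid; omega
      exact ih h2 (by omega) hl hmid'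
  | case3 lo hi h =>
      intro h2 hlt hl hh
      have : hi = lo + 1 := by omega
      subst this
      exact ⟨lo, h2, hl, hh, rfl⟩

-- ===== VERDICT (by name: the statement is the Claim_ definition above) =====
theorem solution_spec : Claim_equal_solution := by
  intro n _
  unfold Spec_solution solution solution_alt
  by_cases hn : n ≤ 1
  · rw [if_pos hn, solutionLoopA, dif_neg (by omega)]
  · rw [if_neg hn]
    have hf2 : (Nat.fib 2 : Int) < n := by
      rw [show Nat.fib 2 = 1 from rfl]; omega
    obtain ⟨j0, hj0two, hj0lt, hj0eq, hj0ge⟩ := expLoop_spec n 2 (le_refl 2) hf2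
    obtain ⟨j, hjtwo, hjl, hjh, hjeq⟩ :=
      binLoop_spec n j0 (2 * j0) hj0two (by omega) hj0lt hj0ge
    simp only [hj0eq]
    rw [show 2 * j0 / 2 = j0 from by omega, hjeq]
    simp only [fibPair_eq]
    have hA : solutionLoopA n 0 1 (by norm_num) (by norm_num)
        = max 0 (min (n - (Nat.fib j : Int)) ((Nat.fib (j + 1) : Int) - n)) := by
      have hstep := loopA_eq_ref n 0 1 (by norm_num) (by norm_num) (by omega : (1 : Int) < n)
      have hbr := refLoop_bracket n j hjl hjh j 0 (by omega)
        (fib_nonneg 0)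
        (by exact_mod_cast Nat.fib_mono (Nat.le_succ 0))
        (by exact_mod_cast Nat.fib_pos.mpr one_pos)
      simp only [show ((Nat.fib 0 : Nat) : Int) = 0 from by norm_num,
        show ((Nat.fib 1 : Nat) : Int) = 1 from by norm_num] at hbr
      exact hstep.trans hbr
    rw [hA]
    have := fib_nonneg j
    omega
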